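-- pv_equiv track=rewrite | github.com/alexeimoisseev/ocpp.md | scripts/generate_site.py | highlight_json
-- ===== SOURCE A (Python) =====
-- def highlight_json(code_text: str) -> str:
--     """Apply .tok-* span highlighting to JSON code."""
--     result = []
--     i = 0
--     text = code_text
--     length = len(text)
--
--     while i < length:
--         ch = text[i]
--
--         # String literal
--         if ch == '"' or ch == '&' and text[i:i+6] == '&quot;':
--             # Find the actual quote character
--             if ch == '&':
--                 quote_str = '&quot;'
--                 quote_len = 6
--             else:
--                 quote_str = '"'
--                 quote_len = 1
--
--             # Scan ahead to find the closing quote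
--             j = i + quote_len
--             while j < length:
--                 if text[j] == '\\':
--                     j += 2  # skip escaped char
--                     continue
--                 if text[j:j+quote_len] == quote_str:
--                     j += quote_len
--                     break
--                 if text[j] == '&':
--                     # HTML entity — check for &quot;
--                     if text[j:j+6] == '&quot;':
--                         j += 6
--                         break
--                 j += 1
--             else:
--                 j = length
--
--             token = text[i:j]
--
--             # Check if this is a key (followed by optional whitespace then colon)
--             rest = text[j:j+10].lstrip()
--             if rest.startswith(':'):
--                 result.append(f'<span class="tok-key">{token}</span>')
--             else:
--                 result.append(f'<span class="tok-str">{token}</span>')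
--             i = j
--             continue
--
--         # Number (after colon/comma/bracket or at start)
--         if ch in '0123456789' or (ch == '-' and i + 1 < length and text[i+1] in '0123456789'):
--             j = i + 1
--             while j < length and text[j] in '0123456789.eE+-':
--                 j += 1
--             result.append(f'<span class="tok-num">{text[i:j]}</span>')
--             i = j
--             continue
--
--         # Booleans and null
--         for keyword in ['true', 'false', 'null']:
--             if text[i:i+len(keyword)] == keyword:
--                 result.append(f'<span class="tok-num">{keyword}</span>')
--                 i += len(keyword)
--                 break
--         else:
--             # Brackets and braces
--             if ch in '{}[]':
--                 result.append(f'<span class="tok-bracket">{ch}</span>')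
--                 i += 1
--             else:
--                 result.append(ch)
--                 i += 1
--
--     return ''.join(result)
-- ===== SOURCE B (Python) =====
-- def highlight_json(code_text: str) -> str:
--     """Apply .tok-* span highlighting to JSON code.
--
--     Token-matcher architecture: an ordered list of matcher functions, each
--     taking the remaining suffix and returning (html, rest) or None.
--     """
--
--     def scan_string(s, html_quote):
--         # s is the text after the opening quote; returns (body, rest),
--         # body includes the closing quote if one was found.
--         body = []
--         while s:
--             c = s[0]
--             if c == '\\':
--                 body.append(s[:2])
--                 s = s[2:]
--             elif s.startswith('&quot;'):
--                 body.append('&quot;')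
--                 return ''.join(body), s[6:]
--             elif not html_quote and c == '"':
--                 body.append('"')
--                 return ''.join(body), s[1:]
--             else:
--                 body.append(c)
--                 s = s[1:]
--         return ''.join(body), ''
--
--     def match_string(s):
--         if s[0] == '"':
--             quote = '"'
--         elif s.startswith('&quot;'):
--             quote = '&quot;'
--         else:
--             return None
--         body, rest = scan_string(s[len(quote):], quote == '&quot;')
--         token = quote + body
--         if rest[:10].lstrip().startswith(':'):
--             return f'<span class="tok-key">{token}</span>', rest
--         return f'<span class="tok-str">{token}</span>', rest
--
--     def match_number(s):
--         digits = '0123456789'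
--         if not (s[0] in digits or (s[0] == '-' and s[1:2] and s[1] in digits)):
--             return None
--         num, rest = s[0], s[1:]
--         while rest and rest[0] in '0123456789.eE+-':
--             num += rest[0]
--             rest = rest[1:]
--         return f'<span class="tok-num">{num}</span>', rest
--
--     def match_keyword(s):
--         for kw in ('true', 'false', 'null'):
--             if s.startswith(kw):
--                 return f'<span class="tok-num">{kw}</span>', s[len(kw):]
--         return None
--
--     def match_bracket(s):
--         if s[0] in '{}[]':
--             return f'<span class="tok-bracket">{s[0]}</span>', s[1:]
--         return None
--
--     matchers = (match_string, match_number, match_keyword, match_bracket)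
--     out = []
--     s = code_text
--     while s:
--         for m in matchers:
--             r = m(s)
--             if r is not None:
--                 html, s = r
--                 out.append(html)
--                 break
--         else:
--             out.append(s[0])
--             s = s[1:]
--     return ''.join(out)
-- ===== Notes on version B (the rewrite author's own statement) =====
-- stated objective: alternative
-- what changed: A's single inline while-loop with index arithmetic is replaced by a token-scanner architecture: an ordered chain of suffix-consuming matcher functions (string, number, keyword, bracket), each returning the emitted span and the remaining suffix, driven by a for-else dispatch loop.
import Mathlib
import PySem

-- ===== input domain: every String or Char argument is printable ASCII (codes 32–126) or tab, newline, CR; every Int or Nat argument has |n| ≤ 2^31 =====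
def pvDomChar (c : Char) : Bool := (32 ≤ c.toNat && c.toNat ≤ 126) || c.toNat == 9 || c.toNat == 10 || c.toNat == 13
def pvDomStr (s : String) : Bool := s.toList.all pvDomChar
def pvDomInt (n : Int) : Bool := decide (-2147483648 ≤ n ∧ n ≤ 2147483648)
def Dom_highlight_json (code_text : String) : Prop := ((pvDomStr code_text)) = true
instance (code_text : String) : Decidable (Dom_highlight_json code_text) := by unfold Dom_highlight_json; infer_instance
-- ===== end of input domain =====

-- B re-implements A's single inline while-loop as an ordered chain of suffix-consuming
-- token matchers (string / number / keyword / bracket), each returning the html span and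
-- the remaining suffix; same output, different decomposition (objective: alternative).

-- ===== PORT A =====
-- A scans the string by INDEX i into the fixed text; while-loops become fuel recursions
-- (fuel counts loop iterations and is always sufficient at the call sites).
-- text[a:b] with 0 ≤ a ≤ b is ported as (t.drop a).take (b-a); text[j] guarded by
-- j < length is ported as t.getD j ' ' (exact: the guard makes the default unreachable).
def aIsDigit (c : Char) : Bool := ("0123456789".toList).contains c
def aIsNum (c : Char) : Bool := ("0123456789.eE+-".toList).contains c
def aIsBracket (c : Char) : Bool := ("{}[]".toList).contains c

-- inner while loop of the string case: returns the final j
def aStrScan (t : List Char) (qs : List Char) (j : Nat) (fuel : Nat) : Nat :=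
  match fuel with
  | 0 => t.length            -- unreachable (fuel > iterations); value = the loop's else-clause
  | fuel + 1 =>
    if j < t.length then
      if t.getD j ' ' = '\\' then aStrScan t qs (j + 2) fuel
      else if (t.drop j).take qs.length = qs then j + qs.length
      else if t.getD j ' ' = '&' then
        if (t.drop j).take 6 = "&quot;".toList then j + 6
        else aStrScan t qs (j + 1) fuel
      else aStrScan t qs (j + 1) fuel
    else t.length            -- the while-else: j = length

-- inner while loop of the number case: returns the final j
def aNumScan (t : List Char) (j : Nat) (fuel : Nat) : Nat :=
  match fuel with
  | 0 => j                   -- unreachable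
  | fuel + 1 =>
    if j < t.length ∧ aIsNum (t.getD j ' ') then aNumScan t (j + 1) fuel else j

-- the main while loop, collecting the result list (pieces as char lists)
def aLoop (t : List Char) (i : Nat) (fuel : Nat) : List (List Char) :=
  match fuel with
  | 0 => []                  -- unreachable
  | fuel + 1 =>
    if i < t.length then
      let ch := t.getD i ' '
      if ch = '"' ∨ (ch = '&' ∧ (t.drop i).take 6 = "&quot;".toList) then
        let qlen : Nat := if ch = '&' then 6 else 1
        let qs : List Char := if ch = '&' then "&quot;".toList else ['"']
        let j := aStrScan t qs (i + qlen) (t.length - (i + qlen) + 1)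
        let token := (t.drop i).take (j - i)
        let rest := PySem.Chars.lstrip ((t.drop j).take 10)
        (if PySem.Chars.startswith rest [':'] then
            "<span class=\"tok-key\">".toList ++ token ++ "</span>".toList
          else
            "<span class=\"tok-str\">".toList ++ token ++ "</span>".toList) :: aLoop t j fuel
      else if aIsDigit ch ∨ (ch = '-' ∧ i + 1 < t.length ∧ aIsDigit (t.getD (i + 1) ' ')) then
        let j := aNumScan t (i + 1) (t.length - (i + 1) + 1)
        ("<span class=\"tok-num\">".toList ++ (t.drop i).take (j - i) ++ "</span>".toList)
          :: aLoop t j fuel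
      else if (t.drop i).take 4 = "true".toList then
        "<span class=\"tok-num\">true</span>".toList :: aLoop t (i + 4) fuel
      else if (t.drop i).take 5 = "false".toList then
        "<span class=\"tok-num\">false</span>".toList :: aLoop t (i + 5) fuel
      else if (t.drop i).take 4 = "null".toList then
        "<span class=\"tok-num\">null</span>".toList :: aLoop t (i + 4) fuel
      else if aIsBracket ch then
        ("<span class=\"tok-bracket\">".toList ++ [ch] ++ "</span>".toList) :: aLoop t (i + 1) fuel
      else
        [ch] :: aLoop t (i + 1) fuel
    else []

def highlight_json (code_text : String) : String :=
  let t := code_text.toList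
  String.mk (aLoop t 0 (t.length + 1)).flatten      -- ''.join(result)

-- ===== PORT B =====
-- B consumes the remaining SUFFIX; helpers are the matcher functions of Source B.
def bDigits : List Char := "0123456789".toList
def bIsNum (c : Char) : Bool := decide (c ∈ "0123456789.eE+-".toList)
def bQuot : List Char := "&quot;".toList

-- scan_string: body of the string after the opening quote + remaining suffix
def bScanStr (s : List Char) (hq : Bool) : List Char × List Char :=
  match s with
  | [] => ([], [])
  | c :: rest =>
    if c = '\\' then
      match rest with
      | [] => ([c], [])
      | c2 :: rest2 =>
        let p := bScanStr rest2 hq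
        (c :: c2 :: p.1, p.2)
    else if bQuot.isPrefixOf (c :: rest) then (bQuot, rest.drop 5)
    else if !hq && c = '"' then (['"'], rest)
    else
      let p := bScanStr rest hq
      (c :: p.1, p.2)

def bMatchString (s : List Char) : Option (List Char × List Char) :=
  match s with
  | [] => none               -- matchers are only invoked on a nonempty suffix
  | c :: rest =>
    if c = '"' ∨ bQuot.isPrefixOf (c :: rest) then
      let q : List Char := if c = '"' then ['"'] else bQuot
      let p := bScanStr ((c :: rest).drop q.length) (q = bQuot)
      let token := q ++ p.1
      some ((if PySem.Chars.startswith (PySem.Chars.lstrip (p.2.take 10)) [':'] then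
               "<span class=\"tok-key\">".toList ++ token ++ "</span>".toList
             else
               "<span class=\"tok-str\">".toList ++ token ++ "</span>".toList), p.2)
    else none

-- the while loop of match_number
def bNumTail (s : List Char) : List Char × List Char :=
  match s with
  | [] => ([], [])
  | c :: rest =>
    if bIsNum c then
      let p := bNumTail rest
      (c :: p.1, p.2)
    else ([], c :: rest)

def bMatchNumber (s : List Char) : Option (List Char × List Char) :=
  match s with
  | [] => none
  | c :: rest =>
    if bDigits.contains c ∨ (c = '-' ∧ rest.take 1 ≠ [] ∧ bDigits.contains (rest.headD ' ')) then
      let p := bNumTail rest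
      some ("<span class=\"tok-num\">".toList ++ (c :: p.1) ++ "</span>".toList, p.2)
    else none

def bMatchKeyword (s : List Char) : Option (List Char × List Char) :=
  if ("true".toList).isPrefixOf s then some ("<span class=\"tok-num\">true</span>".toList, s.drop 4)
  else if ("false".toList).isPrefixOf s then some ("<span class=\"tok-num\">false</span>".toList, s.drop 5)
  else if ("null".toList).isPrefixOf s then some ("<span class=\"tok-num\">null</span>".toList, s.drop 4)
  else none

def bMatchBracket (s : List Char) : Option (List Char × List Char) :=
  match s with
  | [] => none
  | c :: _ =>
    if ("{}[]".toList).contains c then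
      some ("<span class=\"tok-bracket\">".toList ++ [c] ++ "</span>".toList, s.drop 1)
    else none

-- the main while loop with the for-else over the matcher chain
def bLoop (s : List Char) (fuel : Nat) : List (List Char) :=
  match fuel with
  | 0 => []                  -- unreachable
  | fuel + 1 =>
    match s with
    | [] => []
    | c :: rest =>
      match ((bMatchString (c :: rest)).or ((bMatchNumber (c :: rest)).or
              ((bMatchKeyword (c :: rest)).or (bMatchBracket (c :: rest))))) with
      | some (html, rst) => html :: bLoop rst fuel
      | none => [c] :: bLoop rest fuel

def highlight_json_alt (code_text : String) : String :=
  let s := code_text.toList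
  String.mk (bLoop s (s.length + 1)).flatten

-- ===== PRECONDITION & SPEC =====
def Spec_highlight_json (code_text : String) (out : String) : Prop := out = highlight_json_alt code_text
instance (code_text : String) (out : String) : Decidable (Spec_highlight_json code_text out) := by unfold Spec_highlight_json; infer_instance

-- ===== CLAIM (what is proved, stated in full; the proofs are below) =====
def Claim_equal_highlight_json : Prop := ∀ (code_text : String), Dom_highlight_json code_text → Spec_highlight_json code_text (highlight_json code_text)

-- ===== LEMMAS AND PROOFS =====

-- aStrScan stays within [j, length]
theorem aStrScan_of_ge (t qs : List Char) (j fuel : Nat) (h : t.length ≤ j) :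
    aStrScan t qs j fuel = t.length := by
  cases fuel with
  | zero => rfl
  | succ f => unfold aStrScan; simp [Nat.not_lt.mpr h]

theorem aStrScan_ge (t qs : List Char) (j fuel : Nat) (h : j ≤ t.length) :
    j ≤ aStrScan t qs j fuel := by
  induction fuel generalizing j with
  | zero => simpa [aStrScan]
  | succ f ih =>
    unfold aStrScan
    split_ifs with h1 h2 h3 h4 h5
    · by_cases hj : j + 2 ≤ t.length
      · exact le_trans (by omega) (ih (j + 2) hj)
      · rw [aStrScan_of_ge t qs (j + 2) f (by omega)]; exact h
    · omega
    · omega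
    · exact le_trans (by omega) (ih (j + 1) (by omega))
    · exact le_trans (by omega) (ih (j + 1) (by omega))
    · exact h

-- correspondence of the two string scanners
theorem prefix_take {v l : List Char} : v.isPrefixOf l = true ↔ l.take v.length = v := by
  rw [List.isPrefixOf_iff_prefix, List.prefix_iff_eq_take, eq_comm]

theorem bScanStr_nil (hq : Bool) : bScanStr [] hq = ([], []) := rfl

theorem bScanStr_esc_nil (hq : Bool) : bScanStr ['\\'] hq = (['\\'], []) := rfl

theorem bScanStr_esc_cons (c2 : Char) (r2 : List Char) (hq : Bool) :
    bScanStr ('\\' :: c2 :: r2) hq = ('\\' :: c2 :: (bScanStr r2 hq).1, (bScanStr r2 hq).2) := rfl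

theorem bScanStr_cons_ne (c : Char) (rest : List Char) (hq : Bool) (h1 : ¬ c = '\\') :
    bScanStr (c :: rest) hq =
      (if bQuot.isPrefixOf (c :: rest) then (bQuot, rest.drop 5)
       else if !hq && c = '"' then (['"'], rest)
       else (c :: (bScanStr rest hq).1, (bScanStr rest hq).2)) := by
  rw [bScanStr.eq_def]
  simp only [if_neg h1]

theorem bScanStr_eq (t : List Char) (hq : Bool) (fuel j : Nat)
    (hf : t.length - j < fuel) :
    bScanStr (t.drop j) hq =
      ((t.drop j).take (aStrScan t (if hq then bQuot else ['"']) j fuel - j),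
        t.drop (aStrScan t (if hq then bQuot else ['"']) j fuel)) := by
  induction fuel generalizing j with
  | zero => omega
  | succ f ih =>
    by_cases hj : j < t.length
    case neg =>
      have hd : t.drop j = [] := List.drop_eq_nil_of_le (by omega)
      have hA : aStrScan t (if hq then bQuot else ['"']) j (f + 1) = t.length := by
        unfold aStrScan; simp [hj]
      rw [hA, hd, bScanStr_nil]
      simp [List.drop_length]
    case pos =>
      have hd : t.drop j = t[j] :: t.drop (j + 1) := List.drop_eq_getElem_cons hj
      have hgd : t.getD j ' ' = t[j] := List.getD_eq_getElem t ' ' hj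
      by_cases hb : t[j] = '\\'
      · -- escape: skip two characters
        have hA : aStrScan t (if hq then bQuot else ['"']) j (f + 1) =
            aStrScan t (if hq then bQuot else ['"']) (j + 2) f := by
          conv_lhs => unfold aStrScan
          rw [hgd, if_pos hj, if_pos hb]
        by_cases hj1 : j + 1 < t.length
        · have hd2 : t.drop (j + 1) = t[j + 1] :: t.drop (j + 2) :=
            List.drop_eq_getElem_cons hj1
          have hge := aStrScan_ge t (if hq then bQuot else ['"']) (j + 2) f (by omega)
          rw [hA, hd, hd2, hb, bScanStr_esc_cons, ih (j + 2) (by omega)]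
          rw [show aStrScan t (if hq then bQuot else ['"']) (j + 2) f - j =
              aStrScan t (if hq then bQuot else ['"']) (j + 2) f - (j + 2) + 1 + 1 from by omega]
          simp only [List.take_succ_cons]
        · have hd2 : t.drop (j + 1) = [] := List.drop_eq_nil_of_le (by omega)
          have hA2 : aStrScan t (if hq then bQuot else ['"']) j (f + 1) = t.length := by
            rw [hA]; exact aStrScan_of_ge t _ (j + 2) f (by omega)
          rw [hA2, hd, hd2, hb, bScanStr_esc_nil]
          simp [show t.length - j = 1 from by omega, List.drop_length]
      · -- not an escape
        by_cases hq6 : (t.drop j).take 6 = bQuot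
        · -- '&quot;' present at j: both sides close at j + 6
          have hpre : bQuot.isPrefixOf (t.drop j) = true := prefix_take.mpr hq6
          have hamp : t[j] = '&' := by
            have h := hq6
            rw [hd, show bQuot = '&' :: ['q', 'u', 'o', 't', ';'] from rfl,
              show (6 : Nat) = 5 + 1 from rfl, List.take_succ_cons, List.cons.injEq] at h
            exact h.1
          have hB : bScanStr (t.drop j) hq = (bQuot, t.drop (j + 6)) := by
            have hdd : (t.drop (j + 1)).drop 5 = t.drop (j + 6) := by
              rw [List.drop_drop]
            rw [hd, bScanStr_cons_ne _ _ _ hb, ← hd, if_pos hpre, hdd]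
          have hq6' : (t.drop j).take 6 = "&quot;".toList := hq6
          have hA : aStrScan t (if hq then bQuot else ['"']) j (f + 1) = j + 6 := by
            cases hq with
            | true =>
              show aStrScan t bQuot j (f + 1) = j + 6
              unfold aStrScan
              rw [hgd, if_pos hj, if_neg hb,
                if_pos (by rw [show bQuot.length = 6 from rfl]; exact hq6)]
              rfl
            | false =>
              have hq1 : ¬ (t.drop j).take (['"'] : List Char).length = ['"'] := by
                rw [show (['"'] : List Char).length = 1 from rfl, hd]
                simp only [List.take_succ_cons, List.take_zero]
                intro h
                have : t[j] = '"' := by simpa using h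
                rw [this] at hamp
                exact absurd hamp (by decide)
              show aStrScan t ['"'] j (f + 1) = j + 6
              unfold aStrScan
              rw [hgd, if_pos hj, if_neg hb, if_neg hq1, if_pos hamp, if_pos hq6']
          rw [hA, hB, show j + 6 - j = 6 from by omega, ← hq6]
        · -- no entity here
          have hpre : bQuot.isPrefixOf (t.drop j) = false := by
            rw [Bool.eq_false_iff]
            intro h
            exact hq6 (prefix_take.mp h)
          by_cases hclose : hq = false ∧ t[j] = '"'
          · -- plain-quote close (only for a '"'-opened string)
            obtain ⟨hqf, hq1⟩ := hclose
            subst hqf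
            have htake1 : (t.drop j).take 1 = ['"'] := by simp [hd, hq1]
            have hB : bScanStr (t.drop j) false = (['"'], t.drop (j + 1)) := by
              rw [hd, bScanStr_cons_ne _ _ _ hb, ← hd]
              simp [hpre, hq1]
            have hA : aStrScan t ['"'] j (f + 1) = j + 1 := by
              unfold aStrScan
              rw [hgd, if_pos hj, if_neg hb, if_pos (by simpa using htake1)]
              rfl
            simp only [if_false, Bool.false_eq_true]
            rw [hA, hB, show j + 1 - j = 1 from by omega, htake1]
          · -- advance by one character
            have hqsfail : ¬ (t.drop j).take (if hq then bQuot else ['"'] : List Char).length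
                = (if hq then bQuot else ['"']) := by
              cases hq with
              | true => simpa using hq6
              | false =>
                simp only [if_false, Bool.false_eq_true]
                intro h
                rw [show (['"'] : List Char).length = 1 from rfl, hd] at h
                simp only [List.take_succ_cons, List.take_zero] at h
                have : t[j] = '"' := by simpa using h
                exact hclose ⟨rfl, this⟩
            have hnq : (!hq && t[j] = '"') = false := by
              cases hq with
              | true => simp
              | false =>
                simp only [Bool.not_false, Bool.true_and, decide_eq_false_iff_not]
                intro h
                exact hclose ⟨rfl, h⟩
            have hge := aStrScan_ge t (if hq then bQuot else ['"']) (j + 1) f (by omega)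
            have hB : bScanStr (t.drop j) hq =
                (t[j] :: (bScanStr (t.drop (j + 1)) hq).1, (bScanStr (t.drop (j + 1)) hq).2) := by
              rw [hd, bScanStr_cons_ne _ _ _ hb, ← hd]
              simp [hpre, hnq]
            have hA : aStrScan t (if hq then bQuot else ['"']) j (f + 1) =
                aStrScan t (if hq then bQuot else ['"']) (j + 1) f := by
              have hq6' : ¬ (t.drop j).take 6 = "&quot;".toList := hq6
              conv_lhs => unfold aStrScan
              rw [hgd, if_pos hj, if_neg hb, if_neg hqsfail]
              by_cases ha : t[j] = '&'
              · rw [if_pos ha, if_neg hq6']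
              · rw [if_neg ha]
            rw [hA, hB, ih (j + 1) (by omega), hd]
            rw [show aStrScan t (if hq then bQuot else ['"']) (j + 1) f - j =
                aStrScan t (if hq then bQuot else ['"']) (j + 1) f - (j + 1) + 1 from by omega]
            simp only [List.take_succ_cons]

-- aNumScan bounds and correspondence
theorem aNumScan_ge (t : List Char) (j fuel : Nat) : j ≤ aNumScan t j fuel := by
  induction fuel generalizing j with
  | zero => simp [aNumScan]
  | succ f ih =>
    unfold aNumScan
    split_ifs with h1
    · exact le_trans (by omega) (ih (j + 1))
    · exact Nat.le_refl _

theorem bIsNum_eq_aIsNum (c : Char) : bIsNum c = aIsNum c := by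
  simp [bIsNum, aIsNum]

theorem bNumTail_eq (t : List Char) (fuel j : Nat) (hf : t.length - j < fuel) :
    bNumTail (t.drop j) =
      ((t.drop j).take (aNumScan t j fuel - j), t.drop (aNumScan t j fuel)) := by
  induction fuel generalizing j with
  | zero => omega
  | succ f ih =>
    by_cases hj : j < t.length
    · have hd : t.drop j = t[j] :: t.drop (j + 1) := List.drop_eq_getElem_cons hj
      have hgd : t.getD j ' ' = t[j] := List.getD_eq_getElem t ' ' hj
      unfold aNumScan
      by_cases hn : aIsNum t[j] = true
      · have hge := aNumScan_ge t (j + 1) f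
        rw [hd]
        simp only [bNumTail, bIsNum_eq_aIsNum, hn, hgd, hj, true_and, if_pos, if_true]
        rw [ih (j + 1) (by omega)]
        have h1 : aNumScan t (j + 1) f - j = (aNumScan t (j + 1) f - (j + 1)) + 1 := by omega
        rw [h1]
        simp only [List.take_succ_cons]
      · simp only [hgd, hj, true_and, hn, and_false, if_false]
        rw [hd]
        simp only [bNumTail, bIsNum_eq_aIsNum, hn, if_neg, Bool.false_eq_true, not_false_iff]
        simp [← hd]
    · have hd : t.drop j = [] := List.drop_eq_nil_of_le (by omega)
      unfold aNumScan
      simp [hd, bNumTail, Nat.not_lt.mpr (by omega : t.length ≤ j)]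

-- main loop correspondence

theorem bMatchString_quote (rest : List Char) :
    bMatchString ('"' :: rest) =
      some ((if PySem.Chars.startswith (PySem.Chars.lstrip ((bScanStr rest false).2.take 10)) [':'] then
               "<span class=\"tok-key\">".toList ++ ('"' :: (bScanStr rest false).1) ++ "</span>".toList
             else
               "<span class=\"tok-str\">".toList ++ ('"' :: (bScanStr rest false).1) ++ "</span>".toList),
            (bScanStr rest false).2) := rfl

theorem bMatchString_amp (c : Char) (rest : List Char) (hne : ¬ c = '"')
    (hpre : bQuot.isPrefixOf (c :: rest) = true) :
    bMatchString (c :: rest) =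
      some ((if PySem.Chars.startswith
               (PySem.Chars.lstrip ((bScanStr ((c :: rest).drop 6) true).2.take 10)) [':'] then
               "<span class=\"tok-key\">".toList ++ (bQuot ++ (bScanStr ((c :: rest).drop 6) true).1)
                 ++ "</span>".toList
             else
               "<span class=\"tok-str\">".toList ++ (bQuot ++ (bScanStr ((c :: rest).drop 6) true).1)
                 ++ "</span>".toList),
            (bScanStr ((c :: rest).drop 6) true).2) := by
  simp only [bMatchString]
  rw [if_pos (Or.inr hpre), if_neg hne]
  rfl

theorem bMatchString_none (c : Char) (rest : List Char) (h1 : ¬ c = '"')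
    (h2 : bQuot.isPrefixOf (c :: rest) = false) : bMatchString (c :: rest) = none := by
  simp [bMatchString, h1, h2]

theorem bMatchNumber_some (c : Char) (rest : List Char)
    (h : bDigits.contains c ∨ (c = '-' ∧ rest.take 1 ≠ [] ∧ bDigits.contains (rest.headD ' '))) :
    bMatchNumber (c :: rest) =
      some ("<span class=\"tok-num\">".toList ++ (c :: (bNumTail rest).1) ++ "</span>".toList,
        (bNumTail rest).2) := by
  simp only [bMatchNumber]
  rw [if_pos h]

theorem bMatchNumber_none (c : Char) (rest : List Char)
    (h : ¬ (bDigits.contains c ∨ (c = '-' ∧ rest.take 1 ≠ [] ∧ bDigits.contains (rest.headD ' ')))) :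
    bMatchNumber (c :: rest) = none := by
  simp only [bMatchNumber]
  rw [if_neg h]

theorem bMatchKeyword_none (s : List Char) (h1 : ¬ ("true".toList).isPrefixOf s = true)
    (h2 : ¬ ("false".toList).isPrefixOf s = true) (h3 : ¬ ("null".toList).isPrefixOf s = true) :
    bMatchKeyword s = none := by
  simp only [bMatchKeyword]
  rw [if_neg h1, if_neg h2, if_neg h3]

theorem bMatchBracket_none (c : Char) (rest : List Char) (h : ¬ ("{}[]".toList).contains c = true) :
    bMatchBracket (c :: rest) = none := by
  simp only [bMatchBracket]
  rw [if_neg h]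

theorem bLoop_cons (c : Char) (rest : List Char) (f : Nat) :
    bLoop (c :: rest) (f + 1) =
      match ((bMatchString (c :: rest)).or ((bMatchNumber (c :: rest)).or
              ((bMatchKeyword (c :: rest)).or (bMatchBracket (c :: rest))))) with
      | some (html, rst) => html :: bLoop rst f
      | none => [c] :: bLoop rest f := rfl

-- conditions of A's number branch agree with B's matcher condition
theorem numCond_iff (t : List Char) (i : Nat) :
    (bDigits.contains t[i]! ∨ (t[i]! = '-' ∧ (t.drop (i + 1)).take 1 ≠ [] ∧
        bDigits.contains ((t.drop (i + 1)).headD ' '))) ↔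
      (aIsDigit t[i]! ∨ (t[i]! = '-' ∧ i + 1 < t.length ∧ aIsDigit (t.getD (i + 1) ' '))) := by
  have h1 : (t.drop (i + 1)).take 1 ≠ [] ↔ i + 1 < t.length := by
    simp [List.take_eq_nil_iff, List.drop_eq_nil_iff]
  have h2 : i + 1 < t.length → (t.drop (i + 1)).headD ' ' = t.getD (i + 1) ' ' := by
    intro h
    rw [List.drop_eq_getElem_cons h, List.getD_eq_getElem t ' ' h]
    rfl
  constructor
  · rintro (h | ⟨hc, hne, hdig⟩)
    · exact Or.inl h
    · have hlt := h1.mp hne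
      exact Or.inr ⟨hc, hlt, by rw [← h2 hlt]; exact hdig⟩
  · rintro (h | ⟨hc, hlt, hdig⟩)
    · exact Or.inl h
    · exact Or.inr ⟨hc, h1.mpr hlt, by rw [h2 hlt]; exact hdig⟩

theorem loop_eq (t : List Char) (fuel i : Nat) (hf : t.length - i < fuel) :
    aLoop t i fuel = bLoop (t.drop i) fuel := by
  induction fuel generalizing i with
  | zero => omega
  | succ f ih =>
    by_cases hi : i < t.length
    case neg =>
      have hd : t.drop i = [] := List.drop_eq_nil_of_le (by omega)
      conv_lhs => unfold aLoop
      rw [if_neg hi, hd]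
      rfl
    case pos =>
      have hd : t.drop i = t[i] :: t.drop (i + 1) := List.drop_eq_getElem_cons hi
      have hgd : t.getD i ' ' = t[i] := List.getD_eq_getElem t ' ' hi
      conv_lhs => unfold aLoop
      rw [if_pos hi]
      simp only [hgd]
      conv_rhs => rw [hd, bLoop_cons]
      by_cases hstr : t[i] = '"' ∨ (t[i] = '&' ∧ (t.drop i).take 6 = "&quot;".toList)
      · -- string token
        rw [if_pos hstr]
        by_cases hc : t[i] = '"'
        · -- opened by a plain quote
          have hne : ¬ t[i] = '&' := by rw [hc]; decide
          rw [if_neg hne, if_neg hne]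
          have hge : i + 1 ≤ aStrScan t ['"'] (i + 1) (t.length - (i + 1) + 1) :=
            aStrScan_ge t ['"'] (i + 1) _ (by omega)
          have hscan := bScanStr_eq t false (t.length - (i + 1) + 1) (i + 1) (by omega)
          simp only [Bool.false_eq_true, if_false] at hscan
          rw [hc, bMatchString_quote, Option.some_or, hscan]
          have htok : (t.drop i).take (aStrScan t ['"'] (i + 1) (t.length - (i + 1) + 1) - i) =
              '"' :: (t.drop (i + 1)).take (aStrScan t ['"'] (i + 1) (t.length - (i + 1) + 1) - (i + 1)) := by
            rw [hd, hc, show aStrScan t ['"'] (i + 1) (t.length - (i + 1) + 1) - i =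
              (aStrScan t ['"'] (i + 1) (t.length - (i + 1) + 1) - (i + 1)) + 1 from by omega,
              List.take_succ_cons]
          rw [htok, ih (aStrScan t ['"'] (i + 1) (t.length - (i + 1) + 1)) (by omega)]
        · -- opened by '&quot;'
          obtain ⟨hamp, h6⟩ := hstr.resolve_left hc
          rw [if_pos hamp, if_pos hamp,
            show ("&quot;".toList : List Char) = bQuot from rfl]
          have h6' : (t.drop i).take 6 = bQuot := h6
          have hlen6 : i + 6 ≤ t.length := by
            have := congrArg List.length h6
            simp at this
            omega
          have hge : i + 6 ≤ aStrScan t bQuot (i + 6) (t.length - (i + 6) + 1) :=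
            aStrScan_ge t bQuot (i + 6) _ (by omega)
          have hscan := bScanStr_eq t true (t.length - (i + 6) + 1) (i + 6) (by omega)
          simp only [if_true] at hscan
          have hpre : bQuot.isPrefixOf (t[i] :: t.drop (i + 1)) = true := by
            rw [← hd]; exact prefix_take.mpr h6'
          have hdrop6 : (t[i] :: t.drop (i + 1)).drop 6 = t.drop (i + 6) := by
            rw [← hd, List.drop_drop]
          have hsplit : t.drop i = bQuot ++ t.drop (i + 6) := by
            conv_lhs => rw [← List.take_append_drop 6 (t.drop i)]
            rw [h6', List.drop_drop]
          have htok : (t.drop i).take (aStrScan t bQuot (i + 6) (t.length - (i + 6) + 1) - i) =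
              bQuot ++ (t.drop (i + 6)).take (aStrScan t bQuot (i + 6) (t.length - (i + 6) + 1) - (i + 6)) := by
            rw [hsplit, List.take_append,
              List.take_of_length_le (by rw [show bQuot.length = 6 from rfl]; omega),
              show bQuot.length = 6 from rfl, Nat.sub_sub]
          rw [bMatchString_amp t[i] (t.drop (i + 1)) hc hpre, Option.some_or, hdrop6, hscan]
          rw [htok, ih (aStrScan t bQuot (i + 6) (t.length - (i + 6) + 1)) (by omega)]
      · -- not a string token
        rw [if_neg hstr]
        have hnopre : bQuot.isPrefixOf (t[i] :: t.drop (i + 1)) = false := by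
          rw [Bool.eq_false_iff]
          intro h
          have h6 : (t.drop i).take 6 = bQuot := by rw [hd]; exact prefix_take.mp h
          have hamp : t[i] = '&' := by
            have hx := h6
            rw [hd, show bQuot = '&' :: ['q', 'u', 'o', 't', ';'] from rfl,
              show (6 : Nat) = 5 + 1 from rfl, List.take_succ_cons, List.cons.injEq] at hx
            exact hx.1
          exact hstr (Or.inr ⟨hamp, h6⟩)
        have hSnone : bMatchString (t[i] :: t.drop (i + 1)) = none :=
          bMatchString_none _ _ (fun h => hstr (Or.inl h)) hnopre
        rw [hSnone, Option.none_or]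
        by_cases hnum : aIsDigit t[i] ∨ (t[i] = '-' ∧ i + 1 < t.length ∧ aIsDigit (t.getD (i + 1) ' '))
        · -- number token
          rw [if_pos hnum]
          have hbg : t[i]! = t[i] := by
            simp [getElem!_pos, hi]
          have hNcond : bDigits.contains t[i] ∨ (t[i] = '-' ∧ (t.drop (i + 1)).take 1 ≠ [] ∧
              bDigits.contains ((t.drop (i + 1)).headD ' ')) := by
            have := (numCond_iff t i).mpr (by rw [hbg]; exact hnum)
            rw [hbg] at this
            exact this
          rw [bMatchNumber_some t[i] (t.drop (i + 1)) hNcond, Option.some_or]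
          have hge : i + 1 ≤ aNumScan t (i + 1) (t.length - (i + 1) + 1) := aNumScan_ge t (i + 1) _
          rw [bNumTail_eq t (t.length - (i + 1) + 1) (i + 1) (by omega)]
          have htok : (t.drop i).take (aNumScan t (i + 1) (t.length - (i + 1) + 1) - i) =
              t[i] :: (t.drop (i + 1)).take (aNumScan t (i + 1) (t.length - (i + 1) + 1) - (i + 1)) := by
            rw [hd, show aNumScan t (i + 1) (t.length - (i + 1) + 1) - i =
              (aNumScan t (i + 1) (t.length - (i + 1) + 1) - (i + 1)) + 1 from by omega,
              List.take_succ_cons]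
          rw [htok, ih (aNumScan t (i + 1) (t.length - (i + 1) + 1)) (by omega)]
        · -- not a number token
          rw [if_neg hnum]
          have hbg : t[i]! = t[i] := by
            simp [getElem!_pos, hi]
          have hNnone : bMatchNumber (t[i] :: t.drop (i + 1)) = none := by
            refine bMatchNumber_none t[i] (t.drop (i + 1)) ?_
            intro h
            exact hnum ((numCond_iff t i).mp (by rw [hbg]; exact h) |>.imp (by rw [hbg]; exact id)
              (by rw [hbg]; exact id))
          rw [hNnone, Option.none_or]
          by_cases ht4 : (t.drop i).take 4 = "true".toList
          · rw [if_pos ht4]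
            have hpre : ("true".toList).isPrefixOf (t[i] :: t.drop (i + 1)) = true := by
              rw [← hd]; exact prefix_take.mpr ht4
            have : bMatchKeyword (t[i] :: t.drop (i + 1)) =
                some ("<span class=\"tok-num\">true</span>".toList, (t[i] :: t.drop (i + 1)).drop 4) := by
              simp only [bMatchKeyword]
              rw [if_pos hpre]
            rw [this, Option.some_or, ← hd, List.drop_drop,
              ih (i + 4) (by omega)]
          · rw [if_neg ht4]
            have hnt : ¬ ("true".toList).isPrefixOf (t[i] :: t.drop (i + 1)) = true := by
              intro h
              exact ht4 (by rw [hd]; exact prefix_take.mp h)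
            by_cases ht5 : (t.drop i).take 5 = "false".toList
            · rw [if_pos ht5]
              have hpre : ("false".toList).isPrefixOf (t[i] :: t.drop (i + 1)) = true := by
                rw [← hd]; exact prefix_take.mpr ht5
              have : bMatchKeyword (t[i] :: t.drop (i + 1)) =
                  some ("<span class=\"tok-num\">false</span>".toList, (t[i] :: t.drop (i + 1)).drop 5) := by
                simp only [bMatchKeyword]
                rw [if_neg hnt, if_pos hpre]
              rw [this, Option.some_or, ← hd, List.drop_drop,
                ih (i + 5) (by omega)]
            · rw [if_neg ht5]
              have hnf : ¬ ("false".toList).isPrefixOf (t[i] :: t.drop (i + 1)) = true := by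
                intro h
                exact ht5 (by rw [hd]; exact prefix_take.mp h)
              by_cases hn4 : (t.drop i).take 4 = "null".toList
              · rw [if_pos hn4]
                have hpre : ("null".toList).isPrefixOf (t[i] :: t.drop (i + 1)) = true := by
                  rw [← hd]; exact prefix_take.mpr hn4
                have : bMatchKeyword (t[i] :: t.drop (i + 1)) =
                    some ("<span class=\"tok-num\">null</span>".toList, (t[i] :: t.drop (i + 1)).drop 4) := by
                  simp only [bMatchKeyword]
                  rw [if_neg hnt, if_neg hnf, if_pos hpre]
                rw [this, Option.some_or, ← hd, List.drop_drop,
                  ih (i + 4) (by omega)]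
              · rw [if_neg hn4]
                have hnn : ¬ ("null".toList).isPrefixOf (t[i] :: t.drop (i + 1)) = true := by
                  intro h
                  exact hn4 (by rw [hd]; exact prefix_take.mp h)
                have hKnone : bMatchKeyword (t[i] :: t.drop (i + 1)) = none :=
                  bMatchKeyword_none _ hnt hnf hnn
                rw [hKnone, Option.none_or]
                by_cases hbr : aIsBracket t[i]
                · rw [if_pos hbr]
                  have : bMatchBracket (t[i] :: t.drop (i + 1)) =
                      some ("<span class=\"tok-bracket\">".toList ++ [t[i]] ++ "</span>".toList,
                        (t[i] :: t.drop (i + 1)).drop 1) := by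
                    simp only [bMatchBracket]
                    rw [if_pos (show ("{}[]".toList).contains t[i] = true from hbr)]
                  rw [this]
                  simp only [List.drop_one, List.tail_cons]
                  rw [ih (i + 1) (by omega)]
                · rw [if_neg hbr]
                  have hBnone : bMatchBracket (t[i] :: t.drop (i + 1)) = none :=
                    bMatchBracket_none _ _ (fun h => hbr h)
                  rw [hBnone]
                  rw [ih (i + 1) (by omega)]

-- ===== VERDICT (by name: the statement is the Claim_ definition above) =====
theorem highlight_json_spec : Claim_equal_highlight_json := by
  intro ct _
  unfold Spec_highlight_json highlight_json highlight_json_alt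
  have h := loop_eq ct.toList (ct.toList.length + 1) 0 (by omega)
  rw [List.drop_zero] at h
  show String.mk (aLoop ct.toList 0 (ct.toList.length + 1)).flatten = _
  rw [h]
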